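-- pv_equiv track=rewrite | github.com/tsor13/spectrum | src/spectrum/train.py | filter_only_first
-- ===== SOURCE A (Python) =====
-- def filter_only_first(example):
--     # only keep the first contiguous sequence of non -100 tokens
--     labels = example["labels"]
--
--     # Find all non -100 positions
--     non_masked_positions = [i for i, label in enumerate(labels) if label != -100]
--
--     if not non_masked_positions:
--         # If no non -100 tokens, return as is
--         example["labels"] = labels
--         return example
--
--     # Find the first contiguous sequence by working forwards
--     first_pos = non_masked_positions[0]
--     end_of_first_sequence = first_pos
--
--     # Work forwards through the non-masked positions to find the end of the first contiguous block
--     for i in range(len(non_masked_positions) - 1):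
--         current_pos = non_masked_positions[i]
--         next_pos = non_masked_positions[i + 1]
--
--         # If there's a gap (difference > 1), then the contiguous sequence ends at current_pos
--         if next_pos - current_pos > 1:
--             end_of_first_sequence = current_pos
--             break
--         else:
--             # They're contiguous, so extend the sequence forwards
--             end_of_first_sequence = next_pos
--
--     # Create new labels with everything masked except the first contiguous sequence
--     new_labels = [-100] * len(labels)
--     for i in range(first_pos, end_of_first_sequence + 1):
--         if labels[i] != -100:
--             new_labels[i] = labels[i]
--
--     example["labels"] = new_labels
--     return example
-- ===== SOURCE B (Python) =====
-- def filter_only_first(example):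
--     # only keep the first contiguous sequence of non -100 tokens
--     labels = example["labels"]
--     n = len(labels)
--
--     # skip leading masked tokens to find the start of the first run
--     i = 0
--     while i < n and labels[i] == -100:
--         i += 1
--
--     if i == n:
--         # no non -100 tokens at all: nothing to do
--         return example
--
--     # copy the first contiguous run, leave everything else masked
--     new_labels = [-100] * n
--     while i < n and labels[i] != -100:
--         new_labels[i] = labels[i]
--         i += 1
--
--     example["labels"] = new_labels
--     return example
-- ===== Notes on version B (the rewrite author's own statement) =====
-- stated objective: simpler
-- what changed: Instead of building the list of all non-masked positions with enumerate and scanning it for the first gap, B walks the labels directly: skip leading -100s, then copy the first run into a fresh masked list until the next -100.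
-- outside the precondition, e.g. on filter_only_first({'x': [1]}): A raises KeyError, B raises KeyError
import Mathlib
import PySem

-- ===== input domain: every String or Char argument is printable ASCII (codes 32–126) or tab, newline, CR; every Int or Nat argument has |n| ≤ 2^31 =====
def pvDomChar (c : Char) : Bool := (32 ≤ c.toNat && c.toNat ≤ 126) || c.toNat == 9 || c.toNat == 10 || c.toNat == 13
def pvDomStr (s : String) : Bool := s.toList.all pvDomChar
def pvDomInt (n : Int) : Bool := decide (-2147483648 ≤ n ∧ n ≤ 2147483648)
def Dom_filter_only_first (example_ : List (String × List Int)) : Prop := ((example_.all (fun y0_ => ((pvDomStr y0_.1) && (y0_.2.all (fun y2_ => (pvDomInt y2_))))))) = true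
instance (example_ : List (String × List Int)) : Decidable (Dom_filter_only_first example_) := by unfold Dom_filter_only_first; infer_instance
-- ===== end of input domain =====

-- B replaces the enumerate-based position list and gap scan by a direct two-phase
-- walk over the labels (objective: simpler). A also mutates the dict in place; the
-- equivalence proved here is about the return value only.

-- ===== PORT A =====
-- [i for i, label in enumerate(labels) if label != -100]
def pvNonMaskedAux (i : Nat) : List Int → List Nat
  | [] => []
  | x :: xs => if x ≠ -100 then i :: pvNonMaskedAux (i + 1) xs else pvNonMaskedAux (i + 1) xs

-- the forwards scan over non_masked_positions with its break
def pvFindEnd (e : Nat) : List Nat → Nat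
  | c :: n :: rest => if n - c > 1 then c else pvFindEnd n (n :: rest)
  | _ => e

def filter_only_first (example_ : List (String × List Int)) : List (String × List Int) :=
  let d := PySem.Dict.mk example_
  match d.get? "labels" with
  | none => example_   -- KeyError: excluded by Pre_
  | some labels =>
    let nm := pvNonMaskedAux 0 labels
    match nm with
    | [] => (d.insert "labels" labels).items
    | first :: rest =>
      let e := pvFindEnd first (first :: rest)
      let newLabels := (List.range' first (e + 1 - first)).foldl
        (fun nl i => if labels.getD i 0 ≠ -100 then nl.set i (labels.getD i 0) else nl)
        (List.replicate labels.length (-100 : Int))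
      (d.insert "labels" newLabels).items

-- ===== PORT B =====
-- while i < n and labels[i] == -100: i += 1
def pvSkipMask : List Int → Nat
  | [] => 0
  | x :: xs => if x = -100 then pvSkipMask xs + 1 else 0

-- while i < n and labels[i] != -100: new_labels[i] = labels[i]; i += 1
def pvCopyRun : List Int → Nat → List Int → List Int
  | [], _, nl => nl
  | x :: xs, i, nl => if x = -100 then nl else pvCopyRun xs (i + 1) (nl.set i x)

def filter_only_first_alt (example_ : List (String × List Int)) : List (String × List Int) :=
  let d := PySem.Dict.mk example_
  match d.get? "labels" with
  | none => example_   -- KeyError: excluded by Pre_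
  | some labels =>
    let i := pvSkipMask labels
    if i = labels.length then example_
    else (d.insert "labels"
            (pvCopyRun (labels.drop i) i (List.replicate labels.length (-100 : Int)))).items

-- ===== PRECONDITION & SPEC =====
-- Pre_ excludes inputs with no "labels" key (A raises KeyError) and association
-- lists with duplicate keys, which do not represent any Python dict.
def Pre_filter_only_first (example_ : List (String × List Int)) : Prop :=
  ((PySem.Dict.mk example_).get? "labels").isSome = true ∧ (example_.map Prod.fst).Nodup
instance (example_ : List (String × List Int)) : Decidable (Pre_filter_only_first example_) := by unfold Pre_filter_only_first; infer_instance

def pvWitness_filter_only_first : (List (String × List Int)) := [("labels", [1, -100, 2])]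

def Spec_filter_only_first (example_ : List (String × List Int)) (out : List (String × List Int)) : Prop := out = filter_only_first_alt example_
instance (example_ : List (String × List Int)) (out : List (String × List Int)) : Decidable (Spec_filter_only_first example_ out) := by unfold Spec_filter_only_first; infer_instance

-- ===== CLAIM (what is proved, stated in full; the proofs are below) =====
def Claim_equal_filter_only_first : Prop := ∀ (example_ : List (String × List Int)), Dom_filter_only_first example_ → Pre_filter_only_first example_ → Spec_filter_only_first example_ (filter_only_first example_)

-- ===== LEMMAS AND PROOFS =====

-- sequential writes at consecutive indices (proof-only skeleton both loops reduce to)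
def pvWriteRun : List Int → Nat → List Int → List Int
  | [], _, nl => nl
  | r :: rs, i, nl => pvWriteRun rs (i + 1) (nl.set i r)

theorem pvCopyRun_eq_writeRun : ∀ (ys : List Int) (i : Nat) (nl : List Int),
    pvCopyRun ys i nl = pvWriteRun (ys.takeWhile (fun x => x ≠ -100)) i nl := by
  intro ys
  induction ys with
  | nil => intro i nl; rfl
  | cons y ys ih =>
    intro i nl
    by_cases hy : y = -100
    · simp [pvCopyRun, hy, pvWriteRun]
    · simp [pvCopyRun, hy, pvWriteRun, ih]

theorem pvFoldA_eq_writeRun : ∀ (R : List Int) (T : List Int) (L : List Int) (i : Nat) (nl : List Int),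
    (∀ r ∈ R, r ≠ -100) → L.drop i = R ++ T →
    (List.range' i R.length).foldl
      (fun nl j => if L.getD j 0 ≠ -100 then nl.set j (L.getD j 0) else nl) nl
      = pvWriteRun R i nl := by
  intro R
  induction R with
  | nil => intro T L i nl _ _; rfl
  | cons r rs ih =>
    intro T L i nl hR hdrop
    have hget : L.getD i 0 = r := by
      have h1 : L[i]? = some r := by
        have := congrArg List.head? hdrop
        simpa [List.head?_drop] using this
      simp [List.getD_eq_getElem?_getD, h1]
    have hdrop' : L.drop (i + 1) = rs ++ T := by
      have : List.drop 1 (List.drop i L) = rs ++ T := by rw [hdrop]; rfl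
      simpa [List.drop_drop, Nat.add_comm] using this
    have hr : r ≠ -100 := hR r (by simp)
    rw [show (r :: rs).length = rs.length + 1 from rfl, List.range'_succ, List.foldl_cons]
    rw [if_pos (by rw [hget]; exact hr), hget]
    rw [ih T L (i + 1) (nl.set i r) (fun x hx => hR x (by simp [hx])) hdrop']
    rfl

theorem pvSkip_spec : ∀ L : List Int, pvSkipMask L ≤ L.length ∧
    L.take (pvSkipMask L) = List.replicate (pvSkipMask L) (-100) ∧
    (L.drop (pvSkipMask L) = [] ∨ ∃ x t, L.drop (pvSkipMask L) = x :: t ∧ x ≠ -100) := by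
  intro L
  induction L with
  | nil => simp [pvSkipMask]
  | cons x xs ih =>
    by_cases hx : x = -100
    · obtain ⟨h1, h2, h3⟩ := ih
      refine ⟨by simp [pvSkipMask, hx]; omega, ?_, ?_⟩
      · simp [pvSkipMask, hx, List.replicate_succ, h2]
      · simpa [pvSkipMask, hx] using h3
    · exact ⟨by simp [pvSkipMask, hx], by simp [pvSkipMask, hx], Or.inr ⟨x, xs, by simp [pvSkipMask, hx], hx⟩⟩

theorem pvNonMasked_replicate : ∀ (k : Nat) (i : Nat) (xs : List Int),
    pvNonMaskedAux i (List.replicate k (-100) ++ xs) = pvNonMaskedAux (i + k) xs := by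
  intro k
  induction k with
  | zero => intro i xs; simp
  | succ k ih =>
    intro i xs
    rw [List.replicate_succ, List.cons_append, pvNonMaskedAux]
    simp only [ne_eq, not_true_eq_false, if_false, ih]
    have : i + 1 + k = i + (k + 1) := by omega
    rw [this]

theorem pvNonMasked_run : ∀ (R : List Int) (T : List Int) (i : Nat), (∀ r ∈ R, r ≠ -100) →
    pvNonMaskedAux i (R ++ T) = List.range' i R.length ++ pvNonMaskedAux (i + R.length) T := by
  intro R
  induction R with
  | nil => intro T i _; simp
  | cons r rs ih =>
    intro T i hR
    rw [List.cons_append, pvNonMaskedAux, if_pos (hR r (by simp))]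
    rw [show (r :: rs).length = rs.length + 1 from rfl, List.range'_succ, List.cons_append]
    rw [ih T (i + 1) (fun x hx => hR x (by simp [hx]))]
    have : i + 1 + rs.length = i + (rs.length + 1) := by omega
    rw [this]

theorem pvNonMasked_ge : ∀ (xs : List Int) (i : Nat) (q : Nat), q ∈ pvNonMaskedAux i xs → i ≤ q := by
  intro xs
  induction xs with
  | nil => intro i q h; simp [pvNonMaskedAux] at h
  | cons x xs ih =>
    intro i q h
    rw [pvNonMaskedAux] at h
    by_cases hx : x ≠ -100
    · rw [if_pos hx] at h
      rcases List.mem_cons.mp h with h | h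
      · omega
      · have := ih (i + 1) q h; omega
    · rw [if_neg hx] at h
      have := ih (i + 1) q h; omega

theorem pvFindEnd_run : ∀ (k : Nat) (c : Nat) (rest : List Nat),
    (∀ q, rest.head? = some q → c + k + 2 ≤ q) →
    pvFindEnd c (List.range' c (k + 1) ++ rest) = c + k := by
  intro k
  induction k with
  | zero =>
    intro c rest hrest
    cases rest with
    | nil =>
      rw [show List.range' c (0 + 1) = [c] by rw [Nat.zero_add, List.range'_one], List.append_nil]
      rfl
    | cons q t =>
      have hq : c + 2 ≤ q := hrest q rfl
      rw [show List.range' c (0 + 1) = [c] by rw [Nat.zero_add, List.range'_one],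
        List.singleton_append, pvFindEnd, if_pos (by omega)]
      omega
  | succ k ih =>
    intro c rest hrest
    rw [List.range'_succ, List.cons_append,
      show List.range' (c + 1) (k + 1) ++ rest = (c + 1) :: (List.range' (c + 1 + 1) k ++ rest) by
        rw [List.range'_succ]; rfl,
      pvFindEnd, if_neg (by omega),
      show ((c + 1) : Nat) :: (List.range' (c + 1 + 1) k ++ rest) = List.range' (c + 1) (k + 1) ++ rest by
        rw [List.range'_succ]; rfl,
      ih (c + 1) rest (fun q hq => by have := hrest q hq; omega)]
    omega

theorem pvMapOverwrite : ∀ (l : List (String × List Int)) (v : List Int),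
    (PySem.Dict.mk l).get? "labels" = some v → (l.map Prod.fst).Nodup →
    l.map (fun p => if p.1 == "labels" then ("labels", v) else p) = l := by
  intro l
  induction l with
  | nil => intro v _ _; rfl
  | cons p l ih =>
    intro v hget hnd
    rw [PySem.Dict.get?_mk_cons] at hget
    by_cases hp : p.1 = "labels"
    · rw [if_pos (by simp [hp])] at hget
      have hv : v = p.2 := by cases hget; rfl
      have htail : ∀ q ∈ l, q.1 ≠ "labels" := by
        intro q hq hq1
        have : p.1 ∈ l.map Prod.fst := by
          rw [hp, ← hq1]; exact List.mem_map_of_mem hq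
        simp only [List.map_cons, List.nodup_cons] at hnd
        exact hnd.1 this
      rw [List.map_cons, if_pos (by simp [hp]), hv]
      have : l.map (fun q => if q.1 == "labels" then ("labels", p.2) else q) = l := by
        rw [List.map_congr_left (g := id) (fun q hq => by
          simp [if_neg (by simpa using htail q hq)]), List.map_id]
      rw [this, ← hp]
    · rw [if_neg (by simp [hp])] at hget
      simp only [List.map_cons, List.nodup_cons] at hnd
      rw [List.map_cons, if_neg (by simp [hp]), ih v hget hnd.2]

theorem pvInsert_self : ∀ (l : List (String × List Int)) (v : List Int),
    (PySem.Dict.mk l).get? "labels" = some v → (l.map Prod.fst).Nodup →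
    ((PySem.Dict.mk l).insert "labels" v).items = l := by
  intro l v hget hnd
  have hc : (PySem.Dict.mk l).contains "labels" = true := by
    rw [PySem.Dict.contains_eq_isSome_get?, hget]; rfl
  rw [PySem.Dict.items_insert_of_contains _ v hc]
  exact pvMapOverwrite l v hget hnd

theorem pvDropWhile_head : ∀ (l : List Int) (x : Int) (xs : List Int),
    l.dropWhile (fun a => a ≠ -100) = x :: xs → x = -100 := by
  intro l
  induction l with
  | nil => intro x xs h; simp [List.dropWhile] at h
  | cons y ys ih =>
    intro x xs h
    by_cases hy : y = -100
    · rw [List.dropWhile_cons_of_neg (by simp [hy])] at h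
      cases h; exact hy
    · rw [List.dropWhile_cons_of_pos (by simp [hy])] at h
      exact ih x xs h

-- main list-level equality used in both branches
theorem pvMain : ∀ (labels : List Int),
    (pvNonMaskedAux 0 labels = [] ∧ pvSkipMask labels = labels.length) ∨
    (∃ first rest, pvNonMaskedAux 0 labels = first :: rest ∧ pvSkipMask labels ≠ labels.length ∧
      (List.range' first (pvFindEnd first (first :: rest) + 1 - first)).foldl
        (fun nl i => if labels.getD i 0 ≠ -100 then nl.set i (labels.getD i 0) else nl)
        (List.replicate labels.length (-100 : Int))
      = pvCopyRun (labels.drop (pvSkipMask labels)) (pvSkipMask labels)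
          (List.replicate labels.length (-100 : Int))) := by
  intro labels
  obtain ⟨hs_le, htake, hd⟩ := pvSkip_spec labels
  have hL : labels = List.replicate (pvSkipMask labels) (-100) ++ labels.drop (pvSkipMask labels) := by
    conv_lhs => rw [← List.take_append_drop (pvSkipMask labels) labels]
    rw [htake]
  have hRne : ∀ r ∈ (labels.drop (pvSkipMask labels)).takeWhile (fun x => x ≠ -100), r ≠ -100 := by
    intro r hr
    simpa using List.mem_takeWhile_imp hr
  have hRT : (labels.drop (pvSkipMask labels)).takeWhile (fun x => x ≠ -100) ++
      (labels.drop (pvSkipMask labels)).dropWhile (fun x => x ≠ -100) = labels.drop (pvSkipMask labels) :=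
    List.takeWhile_append_dropWhile
  have hnm0 : pvNonMaskedAux 0 labels =
      List.range' (pvSkipMask labels) ((labels.drop (pvSkipMask labels)).takeWhile (fun x => x ≠ -100)).length ++
      pvNonMaskedAux (pvSkipMask labels + ((labels.drop (pvSkipMask labels)).takeWhile (fun x => x ≠ -100)).length)
        ((labels.drop (pvSkipMask labels)).dropWhile (fun x => x ≠ -100)) := by
    conv_lhs => rw [hL]
    rw [pvNonMasked_replicate, Nat.zero_add]
    conv_lhs => rw [← hRT]
    exact pvNonMasked_run _ _ _ hRne
  rcases hd with hnil | ⟨x, t, hxt, hx⟩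
  · left
    have hslen : labels.length ≤ pvSkipMask labels := List.drop_eq_nil_iff.mp hnil
    constructor
    · rw [hnm0, hnil]
      simp [List.takeWhile, pvNonMaskedAux]
    · omega
  · right
    have hslt : pvSkipMask labels < labels.length := by
      by_contra h
      rw [List.drop_eq_nil_of_le (by omega)] at hxt
      simp at hxt
    have hRcons : (labels.drop (pvSkipMask labels)).takeWhile (fun x => x ≠ -100) =
        x :: t.takeWhile (fun x => x ≠ -100) := by
      rw [hxt, List.takeWhile_cons_of_pos (by simp [hx])]
    -- abbreviations
    generalize hk : (t.takeWhile (fun x => x ≠ -100)).length = k'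
    have hklen : ((labels.drop (pvSkipMask labels)).takeWhile (fun x => x ≠ -100)).length = k' + 1 := by
      rw [hRcons, List.length_cons, hk]
    have hrest_ge : ∀ q, (pvNonMaskedAux (pvSkipMask labels + (k' + 1))
        ((labels.drop (pvSkipMask labels)).dropWhile (fun x => x ≠ -100))).head? = some q →
        pvSkipMask labels + k' + 2 ≤ q := by
      intro q hq
      cases hT : (labels.drop (pvSkipMask labels)).dropWhile (fun x => x ≠ -100) with
      | nil => rw [hT] at hq; simp [pvNonMaskedAux] at hq
      | cons t0 T' =>
        have ht0 : t0 = -100 := pvDropWhile_head _ _ _ hT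
        rw [hT, pvNonMaskedAux, if_neg (by simp [ht0])] at hq
        have hmem : q ∈ pvNonMaskedAux (pvSkipMask labels + (k' + 1) + 1) T' :=
          List.mem_of_mem_head? hq
        have := pvNonMasked_ge T' _ q hmem
        omega
    have hnm : pvNonMaskedAux 0 labels = pvSkipMask labels ::
        (List.range' (pvSkipMask labels + 1) k' ++
         pvNonMaskedAux (pvSkipMask labels + (k' + 1))
           ((labels.drop (pvSkipMask labels)).dropWhile (fun x => x ≠ -100))) := by
      rw [hnm0, hklen, List.range'_succ, List.cons_append]
    refine ⟨_, _, hnm, by omega, ?_⟩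
    have hfe : pvFindEnd (pvSkipMask labels)
        (pvSkipMask labels :: (List.range' (pvSkipMask labels + 1) k' ++
          pvNonMaskedAux (pvSkipMask labels + (k' + 1))
            ((labels.drop (pvSkipMask labels)).dropWhile (fun x => x ≠ -100)))) =
        pvSkipMask labels + k' := by
      have := pvFindEnd_run k' (pvSkipMask labels) _ hrest_ge
      rw [List.range'_succ, List.cons_append] at this
      exact this
    rw [hfe, show pvSkipMask labels + k' + 1 - pvSkipMask labels = k' + 1 by omega]
    rw [← hklen]
    rw [pvFoldA_eq_writeRun _ _ labels (pvSkipMask labels) _ hRne hRT.symm]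
    rw [pvCopyRun_eq_writeRun]

-- ===== VERDICT (by name: the statement is the Claim_ definition above) =====
theorem filter_only_first_spec : Claim_equal_filter_only_first := by
  intro example_ _hdom hpre
  unfold Spec_filter_only_first filter_only_first filter_only_first_alt
  obtain ⟨hsome, hnd⟩ := hpre
  cases hget : (PySem.Dict.mk example_).get? "labels" with
  | none => simp [hget] at hsome
  | some labels =>
    simp only [hget]
    rcases pvMain labels with ⟨hnm, hskip⟩ | ⟨first, rest, hnm, hskip, heq⟩
    · simp only [hnm, if_pos hskip]
      exact pvInsert_self example_ labels hget hnd
    · simp only [hnm, if_neg hskip]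
      rw [heq]
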